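-- pv_equiv track=rewrite | github.com/caesuric/mtga-analyzer | draw-analyzer.py | get_cmc
-- ===== SOURCE A (Python) =====
-- def get_cmc(mana_cost):
--     count = 0
--     for x in mana_cost:
--         if x in '123456789':
--             num = int(x)
--             count += num
--         else:
--             count += 1
--     return count
-- ===== SOURCE B (Python) =====
-- def get_cmc(mana_cost):
--     chars = list(mana_cost)
--     digit_value_total = sum(int(d) * chars.count(d) for d in '123456789')
--     digit_chars = sum(chars.count(d) for d in '123456789')
--     return digit_value_total + (len(chars) - digit_chars)
-- ===== Notes on version B (the rewrite author's own statement) =====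
-- stated objective: alternative
-- what changed: Instead of a per-character accumulator loop, B makes one occurrence-counting pass per nonzero digit character (list.count) and combines the nine counts arithmetically with the string length; the per-character branch disappears.
import Mathlib
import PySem

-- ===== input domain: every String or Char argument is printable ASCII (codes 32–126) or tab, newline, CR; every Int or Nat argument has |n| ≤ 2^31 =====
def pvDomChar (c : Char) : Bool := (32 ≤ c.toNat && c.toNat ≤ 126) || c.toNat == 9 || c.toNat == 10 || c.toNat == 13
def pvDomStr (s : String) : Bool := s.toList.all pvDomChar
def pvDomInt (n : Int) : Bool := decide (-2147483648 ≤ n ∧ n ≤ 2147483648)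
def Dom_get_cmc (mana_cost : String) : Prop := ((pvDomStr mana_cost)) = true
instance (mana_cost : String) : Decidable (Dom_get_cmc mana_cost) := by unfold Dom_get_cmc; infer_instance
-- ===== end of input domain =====

-- ===== PORT A =====
-- A: per-character accumulator loop; B: one occurrence count per nonzero digit character, combined arithmetically (alternative decomposition).
def get_cmc (mana_cost : String) : Int :=
  mana_cost.toList.foldl
    (fun count x =>
      if "123456789".toList.contains x then
        -- int(x) on a single digit char '1'..'9' is its numeric value (exact here)
        count + ((x.toNat : Int) - 48)
      else count + 1) 0

-- ===== PORT B =====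
def get_cmc_alt (mana_cost : String) : Int :=
  let chars := mana_cost.toList
  let digit_value_total :=
    ("123456789".toList.map (fun d => ((d.toNat : Int) - 48) * (PySem.List.count chars d : Int))).sum
  let digit_chars :=
    ("123456789".toList.map (fun d => (PySem.List.count chars d : Int))).sum
  digit_value_total + ((chars.length : Int) - digit_chars)

-- ===== PRECONDITION & SPEC =====
def Spec_get_cmc (mana_cost : String) (out : Int) : Prop := out = get_cmc_alt mana_cost
instance (mana_cost : String) (out : Int) : Decidable (Spec_get_cmc mana_cost out) := by unfold Spec_get_cmc; infer_instance

-- ===== CLAIM (what is proved, stated in full; the proofs are below) =====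
def Claim_equal_get_cmc : Prop := ∀ (mana_cost : String), Dom_get_cmc mana_cost → Spec_get_cmc mana_cost (get_cmc mana_cost)

-- ===== LEMMAS AND PROOFS =====
lemma digits_toList :
    "123456789".toList = ['1','2','3','4','5','6','7','8','9'] := by decide

lemma get_cmc_loop (l : List Char) (acc : Int) :
    l.foldl (fun count x =>
      if (['1','2','3','4','5','6','7','8','9'] : List Char).contains x then count + ((x.toNat : Int) - 48)
      else count + 1) acc
    = acc
      + ((['1','2','3','4','5','6','7','8','9'] : List Char).map
          (fun d => ((d.toNat : Int) - 48) * (l.count d : Int))).sum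
      + ((l.length : Int)
          - ((['1','2','3','4','5','6','7','8','9'] : List Char).map
              (fun d => (l.count d : Int))).sum) := by
  induction l generalizing acc with
  | nil => simp
  | cons x xs ih =>
    simp only [List.foldl_cons, ih, List.length_cons]
    by_cases h : (['1','2','3','4','5','6','7','8','9'] : List Char).contains x = true
    · rw [if_pos h]
      simp only [List.contains_eq_mem, decide_eq_true_eq, List.mem_cons,
        List.not_mem_nil, or_false] at h
      rcases h with h | h | h | h | h | h | h | h | h <;> subst h <;>
        · simp [List.count_cons]
          ring
    · rw [if_neg h]
      simp only [List.contains_eq_mem, decide_eq_true_eq, List.mem_cons,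
        List.not_mem_nil, or_false, not_or] at h
      obtain ⟨h1, h2, h3, h4, h5, h6, h7, h8, h9⟩ := h
      simp [List.count_cons, h1, h2, h3, h4, h5, h6, h7, h8, h9]
      ring

-- ===== VERDICT (by name: the statement is the Claim_ definition above) =====
theorem get_cmc_spec : Claim_equal_get_cmc := by
  intro s _
  unfold Spec_get_cmc get_cmc get_cmc_alt
  simp only [PySem.List.count_eq, digits_toList]
  rw [get_cmc_loop]
  ring
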